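-- pv_equiv track=rewrite | github.com/I-BloodRain-I/zyntra1.0 | src/screens/common/order_range.py | _validate_date_mask
-- ===== SOURCE A (Python) =====
-- def _validate_date_mask(proposed: str) -> bool:
--     """Allow only masks like dd-mm-YYYY while typing (digits and hyphens).
--     This validation is permissive during typing, enforcing segment lengths.
--     """
--     if proposed == "":
--         return True
--     if len(proposed) > 10:
--         return False
--     for ch in proposed:
--         if not (ch.isdigit() or ch == "-"):
--             return False
--     parts = proposed.split("-")
--     if len(parts) > 3:
--         return False
--     if len(parts) >= 1 and len(parts[0]) > 2:
--         return False
--     if len(parts) >= 2 and len(parts[1]) > 2: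
--         return False
--     if len(parts) == 3 and len(parts[2]) > 4:
--         return False
--     return True
-- ===== SOURCE B (Python) =====
-- def _validate_date_mask(proposed: str) -> bool:
--     """Single pass: track how many hyphens were seen (segment index) and the
--     running length of the current segment; no parts list is ever built."""
--     if proposed == "":
--         return True
--     if len(proposed) > 10:
--         return False
--     limits = (2, 2, 4)
--     seg = 0
--     cur = 0
--     for ch in proposed:
--         if ch == "-":
--             seg += 1
--             if seg > 2:
--                 return False
--             cur = 0
--         elif ch.isdigit():
--             cur += 1
--             if cur > limits[seg]:
--                 return False
--         else:
--             return False
--     return True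
-- ===== Notes on version B (the rewrite author's own statement) =====
-- stated objective: alternative
-- what changed: Replaced A's two phases (validate every char, then split on hyphen and check each part's length) by a single left-to-right pass that maintains the hyphen count and the running length of the current segment, so no parts list is ever built.
import Mathlib
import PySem

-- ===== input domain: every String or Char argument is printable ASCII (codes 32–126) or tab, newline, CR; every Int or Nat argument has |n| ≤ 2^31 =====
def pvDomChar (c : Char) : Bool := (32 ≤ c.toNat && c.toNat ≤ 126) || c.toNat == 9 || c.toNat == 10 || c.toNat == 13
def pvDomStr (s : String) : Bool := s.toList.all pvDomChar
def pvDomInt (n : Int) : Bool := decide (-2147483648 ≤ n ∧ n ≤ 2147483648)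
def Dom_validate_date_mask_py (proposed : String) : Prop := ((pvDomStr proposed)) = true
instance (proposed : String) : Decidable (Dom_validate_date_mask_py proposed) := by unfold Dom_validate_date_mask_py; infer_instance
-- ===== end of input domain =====

-- B replaces A's char-scan + split('-') + per-part checks by one pass keeping (hyphens seen, current segment length); same O(n) cost, no parts list.

-- ===== PORT A =====
-- 'for ch in proposed: if not valid: return False' is the check that every char is valid.
-- parts[i] is only read under the in-range guards of A, so getD is exact there.
def validate_date_mask_py (proposed : String) : Bool :=
  if proposed == "" then true
  else if PySem.Str.len proposed > 10 then false
  else if ¬ (proposed.toList.all (fun ch => PySem.Chars.isdigit ch || ch == '-')) then false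
  else
    let parts := PySem.Chars.splitOn proposed.toList ['-']
    if parts.length > 3 then false
    else if parts.length ≥ 1 && (parts.getD 0 []).length > 2 then false
    else if parts.length ≥ 2 && (parts.getD 1 []).length > 2 then false
    else if parts.length == 3 && (parts.getD 2 []).length > 4 then false
    else true

-- ===== PORT B =====
def altLimit (seg : Nat) : Nat := if seg = 0 then 2 else if seg = 1 then 2 else 4

def altGo : List Char → Nat → Nat → Bool
  | [], _, _ => true
  | c :: rest, seg, cur =>
    if c == '-' then
      if seg + 1 > 2 then false else altGo rest (seg + 1) 0
    else if PySem.Chars.isdigit c then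
      if cur + 1 > altLimit seg then false else altGo rest seg (cur + 1)
    else false

def validate_date_mask_py_alt (proposed : String) : Bool :=
  if proposed == "" then true
  else if PySem.Str.len proposed > 10 then false
  else altGo proposed.toList 0 0

-- ===== PRECONDITION & SPEC =====
def Spec_validate_date_mask_py (proposed : String) (out : Bool) : Prop := out = validate_date_mask_py_alt proposed
instance (proposed : String) (out : Bool) : Decidable (Spec_validate_date_mask_py proposed out) := by unfold Spec_validate_date_mask_py; infer_instance

-- ===== CLAIM (what is proved, stated in full; the proofs are below) =====
def Claim_equal_validate_date_mask_py : Prop := ∀ (proposed : String), Dom_validate_date_mask_py proposed → Spec_validate_date_mask_py proposed (validate_date_mask_py proposed)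

-- ===== LEMMAS AND PROOFS =====

-- simple structural split on '-' (proof-side model of PySem.Chars.splitOn · ['-'])
def consHeadSeg (c : Char) : List (List Char) → List (List Char)
  | [] => [[c]]
  | s :: ss => (c :: s) :: ss

def split1 : List Char → List (List Char)
  | [] => [[]]
  | c :: r => if c = '-' then [] :: split1 r else consHeadSeg c (split1 r)

def consAccSeg (x : List Char) : List (List Char) → List (List Char)
  | [] => [x]
  | s :: ss => (x ++ s) :: ss

theorem split1_ne_nil (l : List Char) : split1 l ≠ [] := by
  cases l with
  | nil => simp [split1]
  | cons c r =>
    simp only [split1]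
    split
    · simp
    · cases h : split1 r <;> simp [consHeadSeg]

theorem go_eq_split1 (fuel : Nat) (l cur : List Char) (acc : List (List Char))
    (h : l.length < fuel) :
    PySem.Chars.splitOn.go ['-'] fuel l cur acc = acc.reverse ++ consAccSeg cur.reverse (split1 l) := by
  induction fuel generalizing l cur acc with
  | zero => omega
  | succ n ih =>
    cases l with
    | nil => simp [PySem.Chars.splitOn.go, split1, consAccSeg]
    | cons c r =>
      by_cases hc : c = '-'
      · subst hc
        have hpre : List.isPrefixOf ['-'] ('-' :: r) = true := by simp [List.isPrefixOf]
        rw [show PySem.Chars.splitOn.go ['-'] (n+1) ('-' :: r) cur acc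
              = PySem.Chars.splitOn.go ['-'] n (List.drop (List.length ['-']) ('-' :: r)) [] (cur.reverse :: acc) by
              simp [PySem.Chars.splitOn.go, hpre]]
        simp only [List.length_cons, List.length_nil, List.drop_succ_cons, List.drop_zero]
        rw [ih r [] (cur.reverse :: acc) (by simpa using Nat.lt_of_succ_lt_succ h)]
        cases hs : split1 r with
        | nil => exact absurd hs (split1_ne_nil r)
        | cons s ss => simp [split1, consAccSeg, hs]
      · have hpre : List.isPrefixOf ['-'] (c :: r) = false := by
          simp [List.isPrefixOf]
          exact fun hh => absurd hh.symm hc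
        rw [show PySem.Chars.splitOn.go ['-'] (n+1) (c :: r) cur acc
              = PySem.Chars.splitOn.go ['-'] n r (c :: cur) acc by
              simp [PySem.Chars.splitOn.go, hpre]]
        rw [ih r (c :: cur) acc (by simpa using Nat.lt_of_succ_lt_succ h)]
        cases hs : split1 r with
        | nil => exact absurd hs (split1_ne_nil r)
        | cons s ss => simp [split1, hc, consAccSeg, consHeadSeg, hs]

theorem splitOn_minus_eq_split1 (cs : List Char) :
    PySem.Chars.splitOn cs ['-'] = split1 cs := by
  unfold PySem.Chars.splitOn
  rw [go_eq_split1 (cs.length + 1) cs [] [] (Nat.lt_succ_self _)]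
  cases hs : split1 cs with
  | nil => exact absurd hs (split1_ne_nil cs)
  | cons s ss => simp [consAccSeg]

-- B-side characterisation: a recursive per-part check
def chkSegs : Nat → Nat → List (List Char) → Bool
  | _, _, [] => true
  | seg, cur, p :: ps =>
    (decide (cur + p.length ≤ altLimit seg)) &&
      (ps.isEmpty || ((decide (seg + 1 ≤ 2)) && chkSegs (seg + 1) 0 ps))

theorem altGo_eq_chk (cs : List Char) (seg cur : Nat)
    (hcur : cur ≤ altLimit seg) :
    altGo cs seg cur =
      (cs.all (fun ch => PySem.Chars.isdigit ch || ch == '-') && chkSegs seg cur (split1 cs)) := by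
  induction cs generalizing seg cur with
  | nil => simp [altGo, split1, chkSegs, hcur]
  | cons c r ih =>
    by_cases hc : c = '-'
    · subst hc
      have hdig : PySem.Chars.isdigit '-' = false := by decide
      cases hs : split1 r with
      | nil => exact absurd hs (split1_ne_nil r)
      | cons s ss =>
        by_cases hseg : seg + 1 > 2
        · have hne : ¬ (seg + 1 ≤ 2) := by omega
          simp [altGo, split1, chkSegs, hdig, hseg, hne, hs, hcur]
        · have h2 : seg + 1 ≤ 2 := by omega
          rw [show altGo ('-' :: r) seg cur = altGo r (seg + 1) 0 by simp [altGo, hseg]]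
          rw [ih (seg + 1) 0 (by simp [altLimit])]
          simp [split1, chkSegs, hs, hcur, h2, hdig]
    · by_cases hd : PySem.Chars.isdigit c = true
      · cases hs : split1 r with
        | nil => exact absurd hs (split1_ne_nil r)
        | cons s ss =>
          by_cases hlim : cur + 1 > altLimit seg
          · have hdec : ¬ (cur + (s.length + 1) ≤ altLimit seg) := by omega
            simp [altGo, hc, hd, hlim, split1, consHeadSeg, hs, chkSegs, hdec]
          · rw [show altGo (c :: r) seg cur = altGo r seg (cur + 1) by
                simp [altGo, hc, hd, hlim]]
            rw [ih seg (cur + 1) (by omega)]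
            simp [split1, hc, consHeadSeg, hs, chkSegs, hd,
              show cur + (s.length + 1) = cur + 1 + s.length from by omega]
      · simp [altGo, hc, hd, split1]

-- A's four part-checks agree with chkSegs 0 0 on any nonempty parts list
def aChecks (parts : List (List Char)) : Bool :=
  if parts.length > 3 then false
  else if parts.length ≥ 1 && (parts.getD 0 []).length > 2 then false
  else if parts.length ≥ 2 && (parts.getD 1 []).length > 2 then false
  else if parts.length == 3 && (parts.getD 2 []).length > 4 then false
  else true

theorem aChecks_eq_chk (parts : List (List Char)) (h : parts ≠ []) :
    aChecks parts = chkSegs 0 0 parts := by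
  match parts with
  | [] => exact absurd rfl h
  | [p0] => simp [aChecks, chkSegs, altLimit, ← decide_not]
  | [p0, p1] => simp [aChecks, chkSegs, altLimit, ← decide_not]
  | [p0, p1, p2] => simp [aChecks, chkSegs, altLimit, ← decide_not]
  | p0 :: p1 :: p2 :: p3 :: rest => simp [aChecks, chkSegs]

-- ===== VERDICT (by name: the statement is the Claim_ definition above) =====
theorem validate_date_mask_py_spec : Claim_equal_validate_date_mask_py := by
  intro proposed _
  unfold Spec_validate_date_mask_py validate_date_mask_py validate_date_mask_py_alt
  by_cases he : proposed == ""
  · rw [if_pos he, if_pos he]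
  · rw [if_neg he, if_neg he]
    by_cases hl : PySem.Str.len proposed > 10
    · rw [if_pos hl, if_pos hl]
    · rw [if_neg hl, if_neg hl]
      by_cases hall : proposed.toList.all (fun ch => PySem.Chars.isdigit ch || ch == '-') = true
      · rw [if_neg (by simp [hall])]
        show aChecks (PySem.Chars.splitOn proposed.toList ['-']) = _
        rw [splitOn_minus_eq_split1, aChecks_eq_chk _ (split1_ne_nil _),
          altGo_eq_chk proposed.toList 0 0 (by simp [altLimit]), hall, Bool.true_and]
      · rw [if_pos (by simp [hall]), altGo_eq_chk proposed.toList 0 0 (by simp [altLimit])]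
        simp [hall]
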